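-- pv_equiv track=rewrite | github.com/clover-park/test | ox_quiz.py | cal_score
-- ===== SOURCE A (Python) =====
-- def cal_score(list):
--   count = 0
--   score = 0
--   for i in list:
--     if i == 'O':
--       count += 1
--       score += count
--     if i == 'X':
--       count = 0
--   return score
-- ===== SOURCE B (Python) =====
-- def cal_score(list):
--   score = 0
--   rest = list
--   while 'X' in rest:
--     j = rest.index('X')
--     k = rest[:j].count('O')
--     score += k * (k + 1) // 2
--     rest = rest[j+1:]
--   k = rest.count('O')
--   return score + k * (k + 1) // 2
-- ===== Notes on version B (the rewrite author's own statement) =====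
-- stated objective: alternative
-- what changed: Instead of A's single element-by-element pass with a running count, B repeatedly locates the next 'X' with index(), takes the 'X'-delimited segment by slicing, and adds the closed-form triangular number k*(k+1)//2 of that segment's 'O' count.
import Mathlib
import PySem

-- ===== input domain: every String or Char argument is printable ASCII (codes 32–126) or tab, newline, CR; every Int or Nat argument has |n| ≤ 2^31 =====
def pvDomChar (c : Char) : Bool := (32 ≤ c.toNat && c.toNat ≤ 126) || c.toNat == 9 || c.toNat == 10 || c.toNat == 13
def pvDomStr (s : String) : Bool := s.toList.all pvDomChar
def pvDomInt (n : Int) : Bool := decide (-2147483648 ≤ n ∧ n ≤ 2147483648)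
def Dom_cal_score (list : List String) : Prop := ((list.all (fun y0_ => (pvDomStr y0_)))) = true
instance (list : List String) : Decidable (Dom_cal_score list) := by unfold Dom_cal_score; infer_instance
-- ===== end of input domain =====

-- B replaces A's single running-count pass by repeatedly locating the next 'X' with index(),
-- slicing off the segment, and adding its triangular-number contribution (alternative decomposition).


-- ===== PORT A =====
def cal_score (list : List String) : Int :=
  (list.foldl (fun (p : Int × Int) i =>
      let p := if i == "O" then (p.1 + 1, p.2 + (p.1 + 1)) else p
      if i == "X" then (0, p.2) else p)
    (0, 0)).2

-- ===== PORT B =====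
-- the while loop of Source B: each iteration slices off the prefix up to the first 'X'
def cal_score_go (rest : List String) : Int :=
  match h : PySem.List.index? rest "X" with
  | none => PySem.Int.floordiv (((PySem.List.count rest "O" : Int)) * ((PySem.List.count rest "O" : Int) + 1)) 2
  | some j =>
      PySem.Int.floordiv (((PySem.List.count (PySem.List.slice rest none (some (j : Int))) "O" : Int)) * ((PySem.List.count (PySem.List.slice rest none (some (j : Int))) "O" : Int) + 1)) 2
      + cal_score_go (PySem.List.slice rest (some ((j : Int) + 1)) none)
termination_by rest.length
decreasing_by
  obtain ⟨hj, -, -⟩ := PySem.List.getElem_of_index?_eq_some h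
  have : PySem.List.slice rest (some ((j : Int) + 1)) none = rest.drop (j + 1) := by
    have := PySem.List.slice_from_natCast rest (j + 1)
    simpa using this
  rw [this]
  simp [List.length_drop]
  omega

def cal_score_alt (list : List String) : Int := cal_score_go list

-- ===== PRECONDITION & SPEC =====
def Spec_cal_score (list : List String) (out : Int) : Prop := out = cal_score_alt list
instance (list : List String) (out : Int) : Decidable (Spec_cal_score list out) := by unfold Spec_cal_score; infer_instance

-- ===== CLAIM (what is proved, stated in full; the proofs are below) =====
def Claim_equal_cal_score : Prop := ∀ (list : List String), Dom_cal_score list → Spec_cal_score list (cal_score list)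

-- ===== LEMMAS AND PROOFS =====

def pvTri (k : Int) : Int := PySem.Int.floordiv (k * (k + 1)) 2

def pvStep : Int × Int → String → Int × Int := fun p i =>
  let p := if i == "O" then (p.1 + 1, p.2 + (p.1 + 1)) else p
  if i == "X" then (0, p.2) else p

theorem pvTri_succ (k : Int) : pvTri (k + 1) = pvTri k + (k + 1) := by
  unfold pvTri
  have h2 : (0:Int) < 2 := by norm_num
  rw [PySem.Int.floordiv_eq_ediv_of_pos h2, PySem.Int.floordiv_eq_ediv_of_pos h2]
  have : (k + 1) * (k + 1 + 1) = k * (k + 1) + (k + 1) * 2 := by ring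
  rw [this, Int.add_mul_ediv_right _ _ (by norm_num : (2:Int) ≠ 0)]

-- on an 'X'-free segment A's loop adds the segment's O-count both to count and (cumulatively) to score
theorem pv_seg (l : List String) (k a : Int) (hX : "X" ∉ l) :
    l.foldl pvStep (k, a) = (k + (l.count "O" : Int), a + (pvTri (k + (l.count "O" : Int)) - pvTri k)) := by
  induction l generalizing k a with
  | nil => simp
  | cons x xs ih =>
    have hxX : ¬ (x == "X") := by simpa using fun h => hX (by simp [h])
    have hX' : "X" ∉ xs := fun h => hX (List.mem_cons_of_mem _ h)
    simp only [List.foldl_cons]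
    by_cases hO : x == "O"
    · have hx : x = "O" := by simpa using hO
      rw [show pvStep (k, a) x = (k + 1, a + (k + 1)) by simp [pvStep, hO, hxX]]
      rw [ih _ _ hX']
      have hc : ((x :: xs).count "O" : Int) = (xs.count "O" : Int) + 1 := by
        simp [hx]
      rw [hc]
      have ht := pvTri_succ k
      have h2 : k + 1 + (xs.count "O" : Int) = k + ((xs.count "O" : Int) + 1) := by ring
      rw [Prod.mk.injEq]
      rw [h2]
      exact ⟨by ring, by omega⟩
    · have hx : x ≠ "O" := by simpa using hO
      rw [show pvStep (k, a) x = (k, a) by simp [pvStep, hO, hxX]]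
      rw [ih _ _ hX']
      simp [hx]

-- main invariant: starting with count 0, A's loop adds exactly cal_score_go l to the score
theorem pv_main : ∀ n (l : List String), l.length = n → ∀ a : Int,
    (l.foldl pvStep (0, a)).2 = a + cal_score_go l := by
  intro n
  induction n using Nat.strong_induction_on with
  | _ n ih =>
    intro l hlen a
    cases hidx : PySem.List.index? l "X" with
    | none =>
      have hX : "X" ∉ l := (PySem.List.index?_eq_none_iff l "X").mp hidx
      rw [pv_seg l 0 a hX]
      unfold cal_score_go
      rw [hidx]
      simp [pvTri, PySem.List.count]
    | some j =>
      obtain ⟨pre, suf, hsplit, hprelen, hpreX⟩ := (PySem.List.index?_eq_some_iff l "X" j).mp hidx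
      have hslice1 : PySem.List.slice l none (some (j : Int)) = pre := by
        rw [PySem.List.slice_to_natCast, hsplit, ← hprelen, List.take_left]
      have hslice2 : PySem.List.slice l (some ((j : Int) + 1)) none = suf := by
        have := PySem.List.slice_from_natCast l (j + 1)
        rw [show ((j : Int) + 1) = ((j + 1 : Nat) : Int) by push_cast; ring, this,
          hsplit, ← hprelen]
        simp
      have hfold : l.foldl pvStep (0, a) = suf.foldl pvStep (0, a + pvTri (pre.count "O" : Int)) := by
        rw [hsplit, List.foldl_append, pv_seg pre 0 a hpreX, List.foldl_cons]
        have : pvStep ((0:Int) + (pre.count "O" : Int), a + (pvTri (0 + (pre.count "O" : Int)) - pvTri 0)) "X"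
            = (0, a + pvTri (pre.count "O" : Int)) := by
          simp [pvStep, pvTri]
        rw [this]
      rw [hfold]
      have hsuflen : suf.length < n := by
        rw [← hlen, hsplit]; simp; omega
      rw [ih suf.length hsuflen suf rfl]
      conv_rhs => unfold cal_score_go
      split
      · next hnone => rw [hidx] at hnone; cases hnone
      · next j' hsome =>
          rw [hidx] at hsome
          cases hsome
          rw [hslice1, hslice2]
          simp only [PySem.List.count_eq]
          unfold pvTri
          ring

-- ===== VERDICT (by name: the statement is the Claim_ definition above) =====
theorem cal_score_spec : Claim_equal_cal_score := by
  intro list _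
  unfold Spec_cal_score cal_score cal_score_alt
  have h := pv_main list.length list rfl 0
  simp only [zero_add] at h
  rw [← h]
  rfl
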